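-- pv_equiv track=rewrite | github.com/mdth/Masterarbeit | parsing.py | word_window_more_words_help
-- ===== SOURCE A (Python) =====
-- def strip_token(pattern, token):
--     return token.strip(",'.!?;") == pattern or token.strip(',".!?;') == pattern
--
-- def word_window_more_words_help(size, split_pattern, tokens):
--     textsnippets = []
--     for ind, token in enumerate(tokens):
--         p_index = 0
--         end_index = ind
--         while p_index < len(split_pattern):
--             if strip_token(split_pattern[p_index], tokens[end_index]):
--                 p_index += 1
--                 end_index = end_index
--                 end_index += 1
--             else:
--                 break
--         if p_index == len(split_pattern):
--             textsnippets.append(get_textsnippets(ind, end_index - 1, size, len(tokens), tokens))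
--     return textsnippets
--
-- def get_textsnippets(indl, indr, size, textlength, tokens):
--     if (indl - size < 0) and (indr + size > textlength):
--         left_index = size - 1
--         while not (indl - left_index) == 0:
--             left_index -= 1
--         right_index = size - 1
--         while not (indr + right_index) == textlength:
--             right_index -= 1
--         return " ".join(tokens[indl - left_index:indr + right_index])
--
--     elif indr + size > textlength:
--         right_index = size - 1
--         while not (indr + right_index) == textlength:
--             right_index -= 1
--         return " ".join(tokens[indl - size:indr + right_index])
--
--     elif indl - size < 0:
--         left_index = size - 1
--         while not (indl - left_index) == 0:
--             left_index -= 1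
--         return " ".join(tokens[indl - left_index:indr + size + 1])
--     else:
--         return " ".join(tokens[indl - size:indr + (size + 1)])
-- ===== SOURCE B (Python) =====
-- def word_window_more_words_help(size, split_pattern, tokens):
--     n = len(tokens)
--     m = len(split_pattern)
--     # inverted index: stripped form -> ascending list of token positions
--     index = {}
--     for i, t in enumerate(tokens):
--         s1 = t.strip(",'.!?;")
--         s2 = t.strip(',".!?;')
--         index.setdefault(s1, []).append(i)
--         if s2 != s1:
--             index.setdefault(s2, []).append(i)
--     # match positions = intersection of the shifted position sets of the pattern words
--     starts = set(range(n))
--     for j, p in enumerate(split_pattern):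
--         starts &= {i - j for i in index.get(p, [])}
--     out = []
--     for i in sorted(starts):
--         indr = i + m - 1
--         lo = 0 if i - size < 0 else i - size
--         hi = n if indr + size > n else indr + size + 1
--         out.append(" ".join(tokens[lo:hi]))
--     return out
-- ===== Notes on version B (the rewrite author's own statement) =====
-- stated objective: alternative
-- what changed: B builds an inverted index from stripped token forms to position lists and computes the match starts as the intersection of the pattern words' shifted position sets (then sorts them and emits clamped-slice snippets), instead of A's per-start-position inner word-by-word matching loop and counting-down while-loops for the window bounds.
import Mathlib
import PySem

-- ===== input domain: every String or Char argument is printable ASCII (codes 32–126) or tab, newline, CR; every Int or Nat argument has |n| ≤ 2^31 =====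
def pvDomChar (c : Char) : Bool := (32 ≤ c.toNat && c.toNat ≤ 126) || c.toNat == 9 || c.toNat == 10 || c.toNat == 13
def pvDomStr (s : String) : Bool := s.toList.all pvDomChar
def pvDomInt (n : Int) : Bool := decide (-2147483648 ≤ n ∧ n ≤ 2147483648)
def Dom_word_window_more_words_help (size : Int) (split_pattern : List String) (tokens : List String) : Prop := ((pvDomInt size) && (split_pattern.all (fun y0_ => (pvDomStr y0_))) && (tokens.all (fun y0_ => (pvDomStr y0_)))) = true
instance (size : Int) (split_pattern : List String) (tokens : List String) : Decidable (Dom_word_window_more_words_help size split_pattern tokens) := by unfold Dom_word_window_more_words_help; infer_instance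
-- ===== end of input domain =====

-- B finds the match positions by a different algorithm: it builds an inverted index from stripped
-- token forms to position lists and intersects the pattern words' shifted position sets, then emits
-- snippets by clamped-slice arithmetic instead of A's counting-down while-loops (objective: alternative).

-- ===== PORT A =====
def strip_token (pattern token : String) : Bool :=
  (PySem.Str.stripChars token ",'.!?;" == pattern) || (PySem.Str.stripChars token ",\".!?;" == pattern)

-- the inner while loop of A; `none` = IndexError on tokens[end_index]
def loopA (sp toks : List String) (p : Nat) (e : Int) : Option (Nat × Int) :=
  if h : p < sp.length then
    match PySem.List.pyGet? toks e with
    | none => none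
    | some tok =>
      if strip_token sp[p] tok then loopA sp toks (p + 1) (e + 1) else some (p, e)
  else some (p, e)
termination_by sp.length - p

-- `while not (base - cur) == 0: cur -= 1` / `while not (base + cur) == n: cur -= 1`, with the
-- target value factored out; fuel makes it total, A's branch conditions guarantee it suffices
def descendLoop (target cur : Int) (fuel : Nat) : Int :=
  match fuel with
  | 0 => cur
  | f + 1 => if target = cur then cur else descendLoop target (cur - 1) f

def get_textsnippets (indl indr size textlength : Int) (tokens : List String) : String :=
  if indl - size < 0 ∧ indr + size > textlength then
    let left_index := descendLoop indl (size - 1) ((size - 1 - indl).toNat + 1)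
    let right_index := descendLoop (textlength - indr) (size - 1) ((size - 1 - (textlength - indr)).toNat + 1)
    PySem.Str.join " " (PySem.List.slice tokens (some (indl - left_index)) (some (indr + right_index)))
  else if indr + size > textlength then
    let right_index := descendLoop (textlength - indr) (size - 1) ((size - 1 - (textlength - indr)).toNat + 1)
    PySem.Str.join " " (PySem.List.slice tokens (some (indl - size)) (some (indr + right_index)))
  else if indl - size < 0 then
    let left_index := descendLoop indl (size - 1) ((size - 1 - indl).toNat + 1)
    PySem.Str.join " " (PySem.List.slice tokens (some (indl - left_index)) (some (indr + size + 1)))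
  else
    PySem.Str.join " " (PySem.List.slice tokens (some (indl - size)) (some (indr + (size + 1))))

def outerA (size : Int) (sp toks : List String) : List (Int × String) → List String → Option (List String)
  | [], acc => some acc
  | (ind, _tok) :: rest, acc =>
    match loopA sp toks 0 ind with
    | none => none
    | some (p, e) =>
      if p = sp.length then
        outerA size sp toks rest (acc ++ [get_textsnippets ind (e - 1) size (toks.length : Int) toks])
      else
        outerA size sp toks rest acc

def word_window_more_words_help (size : Int) (split_pattern : List String) (tokens : List String) : List String :=
  (outerA size split_pattern tokens (PySem.List.enumerate tokens 0) []).getD []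

-- ===== PORT B =====
-- index.setdefault(s, []).append(i) overwrites key s in place with its old list plus [i]
def addTok (d : PySem.Dict String (List Int)) (it : Int × String) : PySem.Dict String (List Int) :=
  let s1 := PySem.Str.stripChars it.2 ",'.!?;"
  let s2 := PySem.Str.stripChars it.2 ",\".!?;"
  let d1 := d.insert s1 (d.getD s1 [] ++ [it.1])
  if s2 ≠ s1 then d1.insert s2 (d1.getD s2 [] ++ [it.1]) else d1

def word_window_more_words_help_alt (size : Int) (split_pattern : List String) (tokens : List String) : List String :=
  let n := tokens.length
  let m := split_pattern.length
  let index := (PySem.List.enumerate tokens 0).foldl addTok PySem.Dict.empty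
  let starts := (PySem.List.enumerate split_pattern 0).foldl
    (fun st jp =>
      PySem.Set.inter st (PySem.Set.ofList ((index.getD jp.2 []).map (fun i => i - jp.1))))
    (PySem.Set.ofList (PySem.List.pyRange 0 (n : Int) 1))
  (PySem.List.sorted starts (fun x => x) false).map (fun i =>
    let indr : Int := i + (m : Int) - 1
    let lo : Int := if i - size < 0 then 0 else i - size
    let hi : Int := if indr + size > (n : Int) then (n : Int) else indr + size + 1
    PySem.Str.join " " (PySem.List.slice tokens (some lo) (some hi)))

-- ===== PRECONDITION & SPEC =====
-- Pre_ excludes exactly the inputs on which A raises IndexError: a proper prefix of the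
-- pattern matches a suffix of tokens, so A's inner loop reads tokens[len(tokens)].
def Pre_word_window_more_words_help (size : Int) (split_pattern : List String) (tokens : List String) : Prop :=
  ∀ i : Nat, i < tokens.length → tokens.length < i + split_pattern.length →
    ∃ j : Nat, j < tokens.length - i ∧
      strip_token (split_pattern.getD j "") (tokens.getD (i + j) "") = false

instance (size : Int) (split_pattern : List String) (tokens : List String) : Decidable (Pre_word_window_more_words_help size split_pattern tokens) := by unfold Pre_word_window_more_words_help; infer_instance

def pvWitness_word_window_more_words_help : Int × List String × List String :=
  (2, ["a"], ["x", "a,", "a", "y"])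

def Spec_word_window_more_words_help (size : Int) (split_pattern : List String) (tokens : List String) (out : List String) : Prop := out = word_window_more_words_help_alt size split_pattern tokens
instance (size : Int) (split_pattern : List String) (tokens : List String) (out : List String) : Decidable (Spec_word_window_more_words_help size split_pattern tokens out) := by unfold Spec_word_window_more_words_help; infer_instance

-- ===== CLAIM (what is proved, stated in full; the proofs are below) =====
def Claim_equal_word_window_more_words_help : Prop := ∀ (size : Int) (split_pattern : List String) (tokens : List String), Dom_word_window_more_words_help size split_pattern tokens → Pre_word_window_more_words_help size split_pattern tokens → Spec_word_window_more_words_help size split_pattern tokens (word_window_more_words_help size split_pattern tokens)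


-- ===== LEMMAS AND PROOFS =====

def FullMatch (sp toks : List String) (i : Nat) : Prop :=
  ∀ j : Nat, j < sp.length →
    i + j < toks.length ∧ strip_token (sp.getD j "") (toks.getD (i + j) "") = true

def matchAll (sp toks : List String) (k : Nat) : Bool :=
  (List.range sp.length).all
    (fun j => decide (k + j < toks.length) && strip_token (sp.getD j "") (toks.getD (k + j) ""))

-- B's snippet expression at a natural position
def snipN (size : Int) (m n : Nat) (toks : List String) (i : Nat) : String :=
  let indr : Int := (i : Int) + (m : Int) - 1
  let lo : Int := if (i : Int) - size < 0 then 0 else (i : Int) - size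
  let hi : Int := if indr + size > (n : Int) then (n : Int) else indr + size + 1
  PySem.Str.join " " (PySem.List.slice toks (some lo) (some hi))

-- positions (from k on) of tokens strip-matching p
def occsB (p : String) : List String → Int → List Int
  | [], _ => []
  | t :: ts, k => (if strip_token p t then [k] else []) ++ occsB p ts (k + 1)

lemma matchAll_iff (sp toks : List String) (k : Nat) :
    matchAll sp toks k = true ↔ FullMatch sp toks k := by
  simp [matchAll, FullMatch, List.mem_range]

lemma descend_eq : ∀ (k : Nat) (t c : Int), t ≤ c → (c - t).toNat = k → descendLoop t c (k + 1) = t := by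
  intro k
  induction k with
  | zero =>
    intro t c h hk
    have hc : c = t := by omega
    subst hc
    rw [descendLoop]
    simp
  | succ k ih =>
    intro t c h hk
    have hne : ¬ t = c := by omega
    simp only [descendLoop, hne, if_false]
    exact ih t (c - 1) (by omega) (by omega)

lemma snippet_eq (size : Int) (m i : Nat) (toks : List String) :
    get_textsnippets (i : Int) ((i : Int) + (m : Int) - 1) size (toks.length : Int) toks
      = snipN size m toks.length toks i := by
  unfold get_textsnippets snipN
  set indl : Int := (i : Int) with hindl
  set indr : Int := (i : Int) + (m : Int) - 1 with hindr
  set n : Int := (toks.length : Int) with hn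
  have hindl0 : 0 ≤ indl := by positivity
  by_cases c1 : indl - size < 0 <;> by_cases c2 : indr + size > n
  · have hl : descendLoop indl (size - 1) ((size - 1 - indl).toNat + 1) = indl :=
      descend_eq _ _ _ (by omega) rfl
    have hr : descendLoop (n - indr) (size - 1) ((size - 1 - (n - indr)).toNat + 1) = n - indr :=
      descend_eq _ _ _ (by omega) rfl
    simp only [c1, c2, and_self, if_true, if_pos, hl, hr]
    have h1 : indl - indl = (0 : Int) := by ring
    have h2 : indr + (n - indr) = n := by ring
    rw [h1, h2]
  · have hl : descendLoop indl (size - 1) ((size - 1 - indl).toNat + 1) = indl :=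
      descend_eq _ _ _ (by omega) rfl
    simp only [c1, c2, and_false, if_false, if_true, if_pos, hl]
    have h1 : indl - indl = (0 : Int) := by ring
    rw [h1]
  · have hr : descendLoop (n - indr) (size - 1) ((size - 1 - (n - indr)).toNat + 1) = n - indr :=
      descend_eq _ _ _ (by omega) rfl
    simp only [c1, c2, false_and, if_false, if_true, if_pos, hr]
    have h2 : indr + (n - indr) = n := by ring
    rw [h2]
  · simp only [c1, c2, and_false, if_false]
    have h3 : indr + (size + 1) = indr + size + 1 := by ring
    rw [h3]

lemma loopA_run (sp toks : List String) (i : Nat) (hi : i < toks.length)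
    (Hpre : toks.length < i + sp.length →
      ∃ j : Nat, j < toks.length - i ∧ strip_token (sp.getD j "") (toks.getD (i + j) "") = false) :
    ∀ (fuel k : Nat), sp.length - k ≤ fuel → k ≤ sp.length →
      (∀ j : Nat, j < k → i + j < toks.length ∧ strip_token (sp.getD j "") (toks.getD (i + j) "") = true) →
      ∃ p : Nat, loopA sp toks k ((i : Int) + (k : Int)) = some (p, ((i : Int) + (p : Int)))
        ∧ (p = sp.length ↔ FullMatch sp toks i) := by
  intro fuel
  induction fuel with
  | zero =>
    intro k hfuel hk Hprev
    have hkm : k = sp.length := by omega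
    subst hkm
    refine ⟨sp.length, ?_, by simpa [FullMatch] using Hprev⟩
    rw [loopA]; simp
  | succ f ih =>
    intro k hfuel hk Hprev
    by_cases hkm : k < sp.length
    · by_cases hrange : i + k < toks.length
      · have hget : PySem.List.pyGet? toks ((i : Int) + (k : Int)) = some (toks[i + k]'hrange) := by
          have : ((i : Int) + (k : Int)) = ((i + k : Nat) : Int) := by push_cast; ring
          rw [this, PySem.List.pyGet?_natCast, List.getElem?_eq_getElem hrange]
        rw [loopA]
        simp only [hkm, dif_pos, hget]
        by_cases hmatch : strip_token (sp[k]'hkm) (toks[i + k]'hrange) = true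
        · simp only [hmatch, if_true]
          have hcast : ((i : Int) + (k : Int)) + 1 = (i : Int) + ((k + 1 : Nat) : Int) := by push_cast; ring
          rw [hcast]
          refine ih (k + 1) (by omega) (by omega) ?_
          intro j hj
          by_cases hjk : j < k
          · exact Hprev j hjk
          · have : j = k := by omega
            subst this
            refine ⟨hrange, ?_⟩
            rwa [List.getD_eq_getElem sp "" hkm, List.getD_eq_getElem toks "" hrange]
        · simp only [hmatch, if_false]
          refine ⟨k, rfl, ?_⟩
          constructor
          · intro h; omega
          · intro h
            exfalso
            have := (h k hkm).2
            rw [List.getD_eq_getElem sp "" hkm, List.getD_eq_getElem toks "" hrange] at this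
            exact hmatch this
      · exfalso
        have hik : i + k = toks.length := by
          rcases Nat.eq_zero_or_pos k with h0 | hpos
          · omega
          · have := (Hprev (k - 1) (by omega)).1
            omega
        obtain ⟨j, hj, hfalse⟩ := Hpre (by omega)
        have := (Hprev j (by omega)).2
        rw [this] at hfalse
        simp at hfalse
    · have hkm' : k = sp.length := by omega
      subst hkm'
      refine ⟨sp.length, ?_, by simpa [FullMatch] using Hprev⟩
      rw [loopA]; simp

lemma outerA_run (size : Int) (sp toks : List String)
    (Hpre : Pre_word_window_more_words_help size sp toks) :
    ∀ (js : List Nat) (f : Nat → String) (acc : List String), (∀ j ∈ js, j < toks.length) →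
      outerA size sp toks (js.map (fun (j : Nat) => ((j : Int), f j))) acc
        = some (acc ++ ((js.filter (matchAll sp toks)).map
            (snipN size sp.length toks.length toks))) := by
  intro js
  induction js with
  | nil => intro f acc _; simp [outerA]
  | cons j rest ih =>
    intro f acc hlt
    have hj : j < toks.length := hlt j (List.mem_cons_self ..)
    obtain ⟨p, hloop, hiff⟩ :=
      loopA_run sp toks j hj (Hpre j hj) sp.length 0 (by omega) (by omega) (by intro j' h; omega)
    have hloop0 : loopA sp toks 0 ((j : Int)) = some (p, ((j : Int) + (p : Int))) := by
      have : ((j : Int) + ((0 : Nat) : Int)) = (j : Int) := by push_cast; ring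
      rw [← this]; exact hloop
    simp only [List.map_cons, outerA, hloop0]
    by_cases hp : p = sp.length
    · have hmatch : matchAll sp toks j = true := (matchAll_iff sp toks j).mpr (hiff.mp hp)
      simp only [hp, if_pos rfl, List.filter_cons, hmatch, if_true]
      rw [ih f _ (fun j' h => hlt j' (List.mem_cons_of_mem _ h))]
      have he : (j : Int) + ((sp.length : Nat) : Int) - 1 = (j : Int) + (sp.length : Int) - 1 := by push_cast; ring
      rw [he, snippet_eq size sp.length j toks]
      simp
    · have hmatch : matchAll sp toks j = false := by
        rw [← Bool.not_eq_true]
        intro hc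
        exact hp (hiff.mpr ((matchAll_iff sp toks j).mp hc))
      simp only [hp, if_false, List.filter_cons, hmatch]
      exact ih f acc (fun j' h => hlt j' (List.mem_cons_of_mem _ h))

lemma enumerate_as_map (toks : List String) :
    PySem.List.enumerate toks 0 = (List.range toks.length).map (fun (j : Nat) => ((j : Int), toks.getD j "")) := by
  rw [PySem.List.enumerate_eq_map_pyRange toks ""]
  have h2 : PySem.List.len toks = ((toks.length : Nat) : Int) := rfl
  rw [h2, PySem.List.pyRange_zero_natCast, List.map_map]
  apply List.map_congr_left
  intro j hj
  simp [PySem.List.pyGetD_natCast]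

-- characterization of A: the filtered-range form
lemma A_char (size : Int) (sp toks : List String)
    (Hpre : Pre_word_window_more_words_help size sp toks) :
    word_window_more_words_help size sp toks
      = ((List.range toks.length).filter (matchAll sp toks)).map
          (snipN size sp.length toks.length toks) := by
  unfold word_window_more_words_help
  rw [enumerate_as_map]
  rw [outerA_run size sp toks Hpre (List.range toks.length) (fun j => toks.getD j "") []
    (by intro j h; exact List.mem_range.mp h)]
  simp

-- ===== B-side lemmas =====

lemma addTok_getD (d : PySem.Dict String (List Int)) (k : Int) (t : String) (q : String) :
    (addTok d (k, t)).getD q [] = d.getD q [] ++ (if strip_token q t then [k] else []) := by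
  have hst : strip_token q t
      = ((PySem.Str.stripChars t ",'.!?;" == q) || (PySem.Str.stripChars t ",\".!?;" == q)) := rfl
  simp only [addTok]
  by_cases h12 : PySem.Str.stripChars t ",\".!?;" = PySem.Str.stripChars t ",'.!?;"
  · rw [if_neg (by simp [h12]), PySem.Dict.getD_insert, hst, h12]
    by_cases hq : q = PySem.Str.stripChars t ",'.!?;"
    · simp [hq]
    · simp [hq, Ne.symm hq]
  · rw [if_pos h12, PySem.Dict.getD_insert, PySem.Dict.getD_insert, PySem.Dict.getD_insert, hst]
    by_cases hq2 : q = PySem.Str.stripChars t ",\".!?;"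
    · simp [hq2, h12]
    · by_cases hq1 : q = PySem.Str.stripChars t ",'.!?;"
      · simp [hq1, hq2, Ne.symm h12]
      · simp [hq1, hq2, Ne.symm hq1, Ne.symm hq2]

lemma index_getD (toks : List String) (q : String) :
    ∀ (k : Int) (d : PySem.Dict String (List Int)),
      ((PySem.List.enumerate toks k).foldl addTok d).getD q [] = d.getD q [] ++ occsB q toks k := by
  induction toks with
  | nil => intro k d; simp [PySem.List.enumerate_nil, occsB]
  | cons t ts ih =>
    intro k d
    rw [PySem.List.enumerate_cons, List.foldl_cons, ih (k + 1), addTok_getD, occsB]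
    simp [List.append_assoc]

lemma mem_occsB (q : String) (toks : List String) :
    ∀ (k x : Int), x ∈ occsB q toks k ↔
      ∃ idx : Nat, idx < toks.length ∧ x = k + idx ∧ strip_token q (toks.getD idx "") = true := by
  induction toks with
  | nil => intro k x; simp [occsB]
  | cons t ts ih =>
    intro k x
    rw [occsB, List.mem_append, ih (k + 1)]
    constructor
    · rintro (h | ⟨idx, hlt, hx, hs⟩)
      · by_cases hst : strip_token q t = true
        · refine ⟨0, by simp, ?_, by simpa using hst⟩
          simp only [hst, if_true, List.mem_singleton] at h
          simp [h]
        · simp [hst] at h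
      · refine ⟨idx + 1, by simpa using Nat.succ_lt_succ hlt, ?_, by simpa using hs⟩
        push_cast
        push_cast at hx
        omega
    · rintro ⟨idx, hlt, hx, hs⟩
      cases idx with
      | zero =>
        left
        simp only [List.getD_cons_zero] at hs
        simp only [hs, if_true, List.mem_singleton]
        simpa using hx
      | succ j =>
        right
        refine ⟨j, by simpa using Nat.lt_of_succ_lt_succ (by simpa using hlt), ?_, by simpa using hs⟩
        push_cast
        push_cast at hx
        omega

lemma foldl_filter_all {α β : Type} (l : List β) (P : β → α → Bool) (xs : List α) :
    l.foldl (fun st b => st.filter (P b)) xs = xs.filter (fun a => l.all (fun b => P b a)) := by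
  induction l generalizing xs with
  | nil => simp
  | cons b l ih =>
    rw [List.foldl_cons, ih, List.filter_filter]
    apply List.filter_congr
    intro a _
    simp [Bool.and_comm]

lemma cond_eq (sp toks : List String) (k : Nat) (hk : k < toks.length) :
    (PySem.List.enumerate sp 0).all
      (fun jp => PySem.Set.contains
        (PySem.Set.ofList ((occsB jp.2 toks 0).map (fun i => i - jp.1))) ((k : Nat) : Int))
      = matchAll sp toks k := by
  rw [Bool.eq_iff_iff]
  rw [enumerate_as_map sp, List.all_map]
  simp only [List.all_eq_true, List.mem_range, matchAll, Function.comp]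
  constructor
  · intro h j hj
    have hc := h j (by simpa using hj)
    rw [PySem.Set.contains_iff, PySem.Set.mem_ofList, List.mem_map] at hc
    obtain ⟨y, hy, hxy⟩ := hc
    rw [mem_occsB] at hy
    obtain ⟨idx, hidx, hyv, hstrip⟩ := hy
    have hidxe : idx = k + j := by
      subst hyv
      push_cast at hxy
      omega
    subst hidxe
    rw [Bool.and_eq_true]
    exact ⟨decide_eq_true hidx, hstrip⟩
  · intro h j hj
    have hc := h j (by simpa using hj)
    rw [Bool.and_eq_true, decide_eq_true_iff] at hc
    rw [PySem.Set.contains_iff, PySem.Set.mem_ofList, List.mem_map]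
    refine ⟨(0 : Int) + ((k + j : Nat) : Int), (mem_occsB _ _ _ _).mpr ⟨k + j, hc.1, rfl, hc.2⟩, ?_⟩
    push_cast
    ring

lemma B_char (size : Int) (sp toks : List String) :
    word_window_more_words_help_alt size sp toks
      = ((List.range toks.length).filter (matchAll sp toks)).map
          (snipN size sp.length toks.length toks) := by
  have hidx : ∀ q : String,
      ((PySem.List.enumerate toks 0).foldl addTok PySem.Dict.empty).getD q [] = occsB q toks 0 := by
    intro q
    rw [index_getD]
    simp [PySem.Dict.getD_empty]
  simp only [word_window_more_words_help_alt, hidx, PySem.Set.inter]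
  rw [foldl_filter_all (PySem.List.enumerate sp 0)
    (fun jp => fun x => PySem.Set.contains
      (PySem.Set.ofList ((occsB jp.2 toks 0).map (fun i => i - jp.1))) x)]
  rw [PySem.Set.ofList_eq_self_of_nodup _ (PySem.List.nodup_pyRange_one 0 (toks.length : Int))]
  rw [PySem.List.pyRange_zero_natCast]
  rw [List.filter_map]
  simp only [Function.comp_def]
  rw [List.filter_congr (fun k hk => cond_eq sp toks k (List.mem_range.mp hk))]
  rw [PySem.List.sorted_eq_self_of_pairwise]
  · rw [List.map_map]
    rfl
  · exact List.Pairwise.map _ (fun a b h => by exact_mod_cast Nat.le_of_lt h)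
      (List.Pairwise.filter _ List.pairwise_lt_range)

-- ===== VERDICT (by name: the statement is the Claim_ definition above) =====
theorem word_window_more_words_help_spec : Claim_equal_word_window_more_words_help := by
  intro size sp toks _hdom hpre
  show word_window_more_words_help size sp toks = word_window_more_words_help_alt size sp toks
  rw [A_char size sp toks hpre, B_char size sp toks]
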